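-- pv_equiv track=rewrite | github.com/Yoon-men/CodingTest | BaekJoon/1940.py | joyGo
-- ===== SOURCE A (Python) =====
-- from typing import List
--
-- def joyGo(N: int, M: int, nums: List[int]) -> int:
--     nums.sort()
--
--     ans = 0
--
--     for i in range(N-1):
--         for j in range(i+1, N):
--             if nums[i] + nums[j] == M:
--                 ans += 1
--                 break
--
--     return ans
-- ===== SOURCE B (Python) =====
-- def joyGo(N, M, nums):
--     nums.sort()
--     if N < 2:
--         return 0
--     prefix = [nums[i] for i in range(N)]
--     cnt = {}
--     for v in prefix:
--         cnt[v] = cnt.get(v, 0) + 1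
--     ans = 0
--     for v, c in cnt.items():
--         w = M - v
--         if w > v and w in cnt:
--             ans += c
--         elif w == v:
--             ans += c - 1
--     return ans
-- ===== Notes on version B (the rewrite author's own statement) =====
-- stated objective: faster
-- what changed: A scans, for each index of the sorted list, all later indices for a partner summing to M (quadratic); B builds one frequency dictionary of the sorted N-prefix and sums each value's closed-form contribution (count(v) if M-v>v is present, count(v)-1 if M-v=v), removing the inner scan.
import Mathlib
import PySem

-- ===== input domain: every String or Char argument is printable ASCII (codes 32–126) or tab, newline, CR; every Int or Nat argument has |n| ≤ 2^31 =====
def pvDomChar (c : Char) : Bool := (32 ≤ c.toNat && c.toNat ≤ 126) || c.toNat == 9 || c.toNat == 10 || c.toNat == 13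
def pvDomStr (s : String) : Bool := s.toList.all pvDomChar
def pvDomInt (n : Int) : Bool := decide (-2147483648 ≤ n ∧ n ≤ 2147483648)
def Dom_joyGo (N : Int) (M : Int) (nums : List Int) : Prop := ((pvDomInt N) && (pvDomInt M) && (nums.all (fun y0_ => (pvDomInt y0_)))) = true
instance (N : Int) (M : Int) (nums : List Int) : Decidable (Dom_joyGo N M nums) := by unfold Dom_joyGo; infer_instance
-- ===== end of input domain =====

-- B replaces A's quadratic scan-for-a-partner loop by one frequency dictionary over the
-- sorted N-prefix: each value v contributes count(v) if M-v > v is present, count(v)-1 if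
-- M-v = v, else 0 (objective: faster, asymptotic). Both A and B sort `nums` in place; the
-- equivalence proved here is about the return value.

-- ===== PORT A =====
-- inner 'for j in range(i+1, N): if nums[i]+nums[j]==M: … break' — break = stop at first hit
def joyGoFindPair (s : List Int) (M : Int) (vi : Int) (js : List Int) : Bool :=
  match js with
  | [] => false
  | j :: rest =>
    if vi + PySem.List.pyGetD s j 0 = M then true
    else joyGoFindPair s M vi rest

def joyGo (N : Int) (M : Int) (nums : List Int) : Int :=
  let s := PySem.List.sorted nums (fun x => x) false
  (PySem.List.pyRange 0 (N - 1) 1).foldl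
    (fun ans i =>
      if joyGoFindPair s M (PySem.List.pyGetD s i 0) (PySem.List.pyRange (i + 1) N 1)
      then ans + 1 else ans)
    0

-- ===== PORT B =====
-- 'prefix = [nums[i] for i in range(N)]' — in-range on Pre_, ported with the total getter
def joyGo_alt (N : Int) (M : Int) (nums : List Int) : Int :=
  let s := PySem.List.sorted nums (fun x => x) false
  if N < 2 then 0
  else
    let pre := (PySem.List.pyRange 0 N 1).map (fun i => PySem.List.pyGetD s i 0)
    let cnt := pre.foldl (fun d v => d.insert v (d.getD v 0 + 1)) PySem.Dict.empty
    cnt.items.foldl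
      (fun ans vc =>
        if M - vc.1 > vc.1 ∧ cnt.contains (M - vc.1) = true then ans + vc.2
        else if M - vc.1 = vc.1 then ans + vc.2 - 1
        else ans)
      0

-- ===== PRECONDITION & SPEC =====
-- Pre_ excludes exactly the inputs (2 ≤ N and N > len(nums)) on which both A and B raise IndexError.
def Pre_joyGo (N : Int) (M : Int) (nums : List Int) : Prop :=
  N ≤ (nums.length : Int) ∨ N ≤ 1
instance (N : Int) (M : Int) (nums : List Int) : Decidable (Pre_joyGo N M nums) := by
  unfold Pre_joyGo; infer_instance
def pvWitness_joyGo : Int × Int × List Int := (4, 5, [1, 2, 3, 4])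

def Spec_joyGo (N : Int) (M : Int) (nums : List Int) (out : Int) : Prop := out = joyGo_alt N M nums
instance (N : Int) (M : Int) (nums : List Int) (out : Int) : Decidable (Spec_joyGo N M nums out) := by unfold Spec_joyGo; infer_instance

-- ===== CLAIM (what is proved, stated in full; the proofs are below) =====
def Claim_equal_joyGo : Prop := ∀ (N : Int) (M : Int) (nums : List Int), Dom_joyGo N M nums → Pre_joyGo N M nums → Spec_joyGo N M nums (joyGo N M nums)

-- ===== LEMMAS AND PROOFS =====

-- `good p M i` : some element after index i pairs with p[i] to sum M
def joyGood (p : List Int) (M : Int) (i : Nat) : Bool :=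
  (p.drop (i + 1)).any (fun x => p.getD i 0 + x == M)

-- the per-value contribution B computes, as an Int
def joyVal (p : List Int) (M : Int) (v : Int) : Int :=
  if M - v > v ∧ M - v ∈ p then (p.count v : Int)
  else if M - v = v then (p.count v : Int) - 1
  else 0

theorem joyGoFindPair_eq_any (s : List Int) (M vi : Int) (js : List Int) :
    joyGoFindPair s M vi js = js.any (fun j => vi + PySem.List.pyGetD s j 0 == M) := by
  induction js with
  | nil => rfl
  | cons j rest ih =>
    simp [joyGoFindPair, ih]
    by_cases h : vi + PySem.List.pyGetD s j 0 = M <;> simp [h]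

-- B's items loop is 'ans := ans + contribution(vc)'
theorem foldl_body_eq_add_sum (cnt : PySem.Dict Int Int) (M : Int) :
    ∀ (l : List (Int × Int)) (a : Int),
    l.foldl (fun ans vc =>
        if M - vc.1 > vc.1 ∧ cnt.contains (M - vc.1) = true then ans + vc.2
        else if M - vc.1 = vc.1 then ans + vc.2 - 1
        else ans) a
      = a + (l.map (fun vc =>
          if M - vc.1 > vc.1 ∧ cnt.contains (M - vc.1) = true then vc.2
          else if M - vc.1 = vc.1 then vc.2 - 1
          else 0)).sum := by
  intro l
  induction l with
  | nil => simp
  | cons x t ih =>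
    intro a
    simp only [List.foldl_cons, List.map_cons, List.sum_cons]
    rw [ih]
    split_ifs <;> ring

-- partition a countP by the (nodup, covering) list of values the elements take
theorem sum_map_ite_eq_countP {β : Type} (V : List β) (c : β → Bool) :
    (V.map (fun v => if c v then 1 else 0)).sum = V.countP c := by
  induction V with
  | nil => simp
  | cons v t ih => rw [List.map_cons, List.sum_cons, List.countP_cons, ih]; by_cases h : c v <;> simp [h] <;> omega

theorem countP_partition {α β : Type} [DecidableEq β] (l : List α) (val : α → β)
    (P : α → Bool) : ∀ (V : List β), V.Nodup → (∀ x ∈ l, val x ∈ V) →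
    l.countP P = (V.map (fun v => l.countP (fun x => P x && (val x == v)))).sum := by
  induction l with
  | nil => intro V _ _; simp
  | cons x t ih =>
    intro V hnd hcov
    have hx : val x ∈ V := hcov x (by simp)
    have ht : ∀ y ∈ t, val y ∈ V := fun y hy => hcov y (by simp [hy])
    rw [List.countP_cons]
    have hsplit : (V.map (fun v => (x :: t).countP (fun y => P y && (val y == v)))).sum
        = (V.map (fun v => t.countP (fun y => P y && (val y == v)))).sum
          + (V.map (fun v => if P x && (val x == v) then 1 else 0)).sum := by
      rw [← List.sum_map_add]
      congr 1
      apply List.map_congr_left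
      intro v _
      rw [List.countP_cons]
    rw [hsplit, ih V hnd ht]
    congr 1
    rw [sum_map_ite_eq_countP]
    by_cases hP : P x
    · have h1 : V.countP (fun v => P x && (val x == v)) = V.countP (fun v => v == val x) := by
        apply List.countP_congr
        intro v _
        simp [hP]
        exact eq_comm
      rw [h1]
      have h2 : V.countP (fun v => v == val x) = V.count (val x) := rfl
      rw [h2, List.count_eq_one_of_mem hnd hx]
      simp [hP]
    · simp [hP, List.countP_eq_zero.2]

-- #{ i | p[i] = v } = count v
theorem countP_range_val (p : List Int) (v : Int) :
    (List.range p.length).countP (fun i => p.getD i 0 == v) = p.count v := by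
  induction p with
  | nil => simp
  | cons a t ih =>
    rw [List.length_cons, List.range_succ_eq_map, List.countP_cons, List.countP_map]
    have h1 : ((fun i => (a :: t).getD i 0 == v) ∘ Nat.succ) = (fun i => t.getD i 0 == v) := by
      funext i; simp
    rw [h1, ih, List.count_cons]
    by_cases h : a = v <;> simp [h]

-- #{ i | p[i] = v and v occurs after i } = count v - 1 (stated additively)
theorem countP_range_later (p : List Int) (v : Int) :
    (List.range p.length).countP
      (fun i => (p.getD i 0 == v) && decide (v ∈ p.drop (i + 1)))
      + (if v ∈ p then 1 else 0) = p.count v := by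
  induction p with
  | nil => simp
  | cons a t ih =>
    rw [List.length_cons, List.range_succ_eq_map, List.countP_cons, List.countP_map]
    have h1 : List.countP ((fun i => ((a :: t).getD i 0 == v) && decide (v ∈ (a :: t).drop (i + 1))) ∘ Nat.succ)
          (List.range t.length)
        = List.countP (fun i => (t.getD i 0 == v) && decide (v ∈ t.drop (i + 1)))
          (List.range t.length) := by
      apply List.countP_congr
      intro i _
      simp
    rw [h1, List.count_cons, ← ih]
    by_cases h : a = v
    · by_cases hm : v ∈ t <;> simp [h, hm] <;> omega
    · by_cases hm : v ∈ t <;> simp [h, hm, Ne.symm h] <;> omega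

-- sorted: entries are monotone in the index (getD form)
theorem sorted_getD_mono (p : List Int) (hs : p.Pairwise (· ≤ ·))
    {i j : Nat} (hij : i ≤ j) (hj : j < p.length) : p.getD i 0 ≤ p.getD j 0 := by
  rcases Nat.eq_or_lt_of_le hij with rfl | hlt
  · exact le_refl _
  · have := List.pairwise_iff_getElem.1 hs i j (lt_trans hlt hj) hj hlt
    rwa [List.getD_eq_getElem p 0 (lt_trans hlt hj), List.getD_eq_getElem p 0 hj]

-- membership after index i
theorem mem_drop_of_getElem (p : List Int) {k i : Nat} (hk : k < p.length)
    (hik : i ≤ k) : p[k] ∈ p.drop i := by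
  have : (p.drop i)[k - i]'(by rw [List.length_drop]; omega) = p[k] := by
    rw [List.getElem_drop]; congr 1; omega
  rw [← this]; exact List.getElem_mem _

theorem take_getD (s : List Int) (n k : Nat) (d : Int) (hk : k < n) :
    (s.take n).getD k d = s.getD k d := by
  by_cases h : k < s.length
  · rw [List.getD_eq_getElem _ _ (by simp [List.length_take]; omega),
      List.getD_eq_getElem _ _ h]
    exact List.getElem_take
  · rw [List.getD_eq_default _ _ (by simp [List.length_take]; omega),
      List.getD_eq_default _ _ (by omega)]

-- B's comprehension over range(N) builds exactly the N-prefix when N is in range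
theorem map_pyRange_eq_take (s : List Int) (N : Int) (h0 : 0 ≤ N)
    (hle : N ≤ (s.length : Int)) :
    (PySem.List.pyRange 0 N 1).map (fun i => PySem.List.pyGetD s i 0) = s.take N.toNat := by
  apply List.ext_getElem
  · rw [List.length_map, PySem.List.length_pyRange_one, List.length_take]
    omega
  · intro k h1 h2
    rw [List.getElem_map, PySem.List.getElem_pyRange_one, List.getElem_take]
    simp only [List.length_map, PySem.List.length_pyRange_one] at h1
    rw [zero_add, PySem.List.pyGetD_natCast, List.getD_eq_getElem s 0 (by omega)]

-- THE CORE LEMMA: on a sorted list, the number of indices with a later partner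
-- summing to M equals the per-value closed-form sum over the distinct values.
theorem core_count (p : List Int) (M : Int) (hs : p.Pairwise (· ≤ ·)) :
    ((List.range p.length).countP (joyGood p M) : Int)
      = ((PySem.List.dedup p).map (joyVal p M)).sum := by
  rw [countP_partition (List.range p.length) (fun i => p.getD i 0) (joyGood p M)
    (PySem.List.dedup p) (PySem.List.nodup_dedup p) ?cov]
  case cov =>
    intro i hi
    have hi' : i < p.length := List.mem_range.1 hi
    show p.getD i 0 ∈ PySem.List.dedup p
    rw [PySem.List.mem_dedup, List.getD_eq_getElem p 0 hi']
    exact List.getElem_mem _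
  rw [Nat.cast_list_sum, List.map_map]
  congr 1
  apply List.map_congr_left
  intro v hv
  have hvp : v ∈ p := (PySem.List.mem_dedup p v).1 hv
  simp only [Function.comp_apply]
  by_cases h1 : M - v > v ∧ M - v ∈ p
  · -- every index holding v has a later partner M - v
    have hcong : ∀ i ∈ List.range p.length,
        (joyGood p M i && (p.getD i 0 == v)) = (p.getD i 0 == v) := by
      intro i hi
      have hi' : i < p.length := List.mem_range.1 hi
      by_cases hiv : p.getD i 0 = v
      · have hgood : joyGood p M i = true := by
          obtain ⟨k, hk, hkv⟩ := List.mem_iff_getElem.1 h1.2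
          have hkk : p.getD k 0 = M - v := by rw [List.getD_eq_getElem p 0 hk, hkv]
          have hik : i < k := by
            by_contra hle'
            have hle'' : k ≤ i := by omega
            have := sorted_getD_mono p hs hle'' hi'
            omega
          rw [joyGood, List.any_eq_true]
          refine ⟨p[k], mem_drop_of_getElem p hk (by omega), ?_⟩
          simp only [beq_iff_eq, hiv, hkv]
          omega
        rw [hgood, Bool.true_and]
      · rw [beq_eq_false_iff_ne.mpr hiv, Bool.and_false]
    rw [List.countP_congr (fun x hx => by rw [hcong x hx]), countP_range_val]
    simp only [joyVal]
    rw [if_pos h1]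
  · by_cases h2 : M - v = v
    · have hcong : ∀ i ∈ List.range p.length,
          (joyGood p M i && (p.getD i 0 == v))
            = ((p.getD i 0 == v) && decide (v ∈ p.drop (i + 1))) := by
        intro i hi
        by_cases hiv : p.getD i 0 = v
        · have hpred : ∀ x, (p.getD i 0 + x == v + v) = (x == v) := by
            intro x
            rw [Bool.eq_iff_iff]
            simp only [beq_iff_eq, hiv]
            omega
          have hM : M = v + v := by omega
          have hmem : ((p.drop (i + 1)).any (fun x => x == v) = true) ↔ v ∈ p.drop (i + 1) := by
            rw [List.any_eq_true]
            constructor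
            · rintro ⟨x, hx, hxe⟩
              exact (beq_iff_eq.1 hxe) ▸ hx
            · intro h
              exact ⟨v, h, beq_self_eq_true v⟩
          have hany : joyGood p M i = decide (v ∈ p.drop (i + 1)) := by
            rw [joyGood, hM, PySem.List.any_congr_mem (fun x _ => hpred x),
              Bool.eq_iff_iff, decide_eq_true_eq]
            exact hmem
          rw [hany, beq_iff_eq.mpr hiv, Bool.true_and, Bool.and_true]
        · rw [beq_eq_false_iff_ne.mpr hiv, Bool.and_false, Bool.false_and]
      rw [List.countP_congr (fun x hx => by rw [hcong x hx])]
      have hlater := countP_range_later p v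
      rw [if_pos hvp] at hlater
      simp only [joyVal]
      rw [if_neg h1, if_pos h2]
      omega
    · have hzero : (List.range p.length).countP
          (fun i => joyGood p M i && (p.getD i 0 == v)) = 0 := by
        rw [List.countP_eq_zero]
        intro i hi
        simp only [Bool.and_eq_true, beq_iff_eq, not_and]
        intro hgood hiv
        rw [joyGood, List.any_eq_true] at hgood
        obtain ⟨x, hxmem, hxeq⟩ := hgood
        simp only [beq_iff_eq] at hxeq
        have hxp : x ∈ p := List.mem_of_mem_drop hxmem
        obtain ⟨j, hj, hjx⟩ := List.mem_iff_getElem.1 hxmem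
        have hi' : i < p.length := List.mem_range.1 hi
        have hlen' : i + 1 + j < p.length := by
          rw [List.length_drop] at hj; omega
        have hxe : x = p.getD (i + 1 + j) 0 := by
          rw [List.getD_eq_getElem p 0 hlen', ← hjx, List.getElem_drop]
        have hge : p.getD i 0 ≤ p.getD (i + 1 + j) 0 :=
          sorted_getD_mono p hs (by omega) hlen'
        exact h1 ⟨by omega, by rw [show M - v = x by omega]; exact hxp⟩
      rw [hzero]
      simp only [joyVal]
      rw [if_neg h1, if_neg h2]
      simp

-- evaluating B on the sorted prefix p
theorem joyGo_alt_eval (N : Int) (M : Int) (nums : List Int) (h2 : 2 ≤ N)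
    (hle : N ≤ ((PySem.List.sorted nums (fun x => x) false).length : Int)) :
    joyGo_alt N M nums
      = ((PySem.List.dedup ((PySem.List.sorted nums (fun x => x) false).take N.toNat)).map
          (joyVal ((PySem.List.sorted nums (fun x => x) false).take N.toNat) M)).sum := by
  have h0 : ¬ N < 2 := by omega
  simp only [joyGo_alt, h0, if_false,
    map_pyRange_eq_take _ N (by omega) hle,
    PySem.Dict.foldl_insert_getD_add_one_eq_counter,
    PySem.Dict.items_counter]
  rw [foldl_body_eq_add_sum]
  rw [zero_add, List.map_map, ← PySem.List.dedup_eq_ofList]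
  congr 1
  apply List.map_congr_left
  intro v hv
  have hvp : v ∈ (PySem.List.sorted nums (fun x => x) false).take N.toNat :=
    (PySem.List.mem_dedup _ v).1 hv
  simp only [Function.comp_apply, PySem.Dict.contains_counter, joyVal]
  have hmc : (((PySem.List.sorted nums (fun x => x) false).take N.toNat).contains (M - v) = true)
      = (M - v ∈ (PySem.List.sorted nums (fun x => x) false).take N.toNat) := by simp
  by_cases hgt : M - v > v <;>
    by_cases hm : M - v ∈ (PySem.List.sorted nums (fun x => x) false).take N.toNat <;>
    simp [hgt, hm]

-- evaluating A on the sorted prefix p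
theorem joyGoA_count (N M : Int) (s : List Int) (h2 : 2 ≤ N) (hle : N ≤ (s.length : Int)) :
    (PySem.List.pyRange 0 (N - 1) 1).foldl
      (fun ans i =>
        if joyGoFindPair s M (PySem.List.pyGetD s i 0) (PySem.List.pyRange (i + 1) N 1)
        then ans + 1 else ans) 0
      = (((List.range (s.take N.toNat).length).countP (joyGood (s.take N.toNat) M) : Nat) : Int) := by
  rw [PySem.List.foldl_if_add_one, zero_add]
  congr 1
  set p := s.take N.toNat with hp
  have hlen : p.length = N.toNat := by
    rw [hp, List.length_take]; omega
  rw [PySem.List.pyRange_one, List.countP_map]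
  have hn1 : (N - 1 - 0).toNat = p.length - 1 := by omega
  rw [hn1]
  have hcong : ∀ k ∈ List.range (p.length - 1),
      ((fun i => joyGoFindPair s M (PySem.List.pyGetD s i 0) (PySem.List.pyRange (i + 1) N 1))
        ∘ (fun k : Nat => (0 : Int) + ↑k)) k
        = joyGood p M k := by
    intro k hk
    have hk' : k < p.length - 1 := List.mem_range.1 hk
    have hkp : k < N.toNat := by omega
    simp only [Function.comp_apply, zero_add]
    rw [joyGoFindPair_eq_any, joyGood, PySem.List.pyGetD_natCast]
    rw [← take_getD s N.toNat k 0 hkp, ← hp]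
    have hNlen : PySem.List.len p = N := by
      simp [PySem.List.len, hlen]; omega
    rw [← hNlen]
    have hdrop := PySem.List.map_pyGetD_pyRange p 0 (a := (k : Int) + 1) (by omega)
    have htn : ((k : Int) + 1).toNat = k + 1 := by omega
    rw [htn] at hdrop
    rw [← hdrop, List.any_map]
    apply PySem.List.any_congr_mem
    intro j hj
    have hj' := PySem.List.mem_pyRange_one.1 hj
    have hjlen : j < (p.length : Int) := by
      have := hj'.2
      simp [PySem.List.len] at this
      omega
    obtain ⟨jn, rfl⟩ : ∃ jn : Nat, j = (jn : Int) := ⟨j.toNat, by omega⟩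
    have hjn : jn < N.toNat := by omega
    simp only [Function.comp_apply, PySem.List.pyGetD_natCast]
    rw [hp, take_getD s N.toNat jn 0 hjn]
  rw [List.countP_congr (fun x hx => by rw [hcong x hx])]
  have hplen : p.length = (p.length - 1) + 1 := by omega
  conv_rhs => rw [hplen]
  rw [List.range_succ, List.countP_append]
  have hlast : joyGood p M (p.length - 1) = false := by
    have hnil : p.drop ((p.length - 1) + 1) = [] :=
      List.drop_eq_nil_of_le (by omega)
    simp [joyGood, hnil]
  simp [hlast]

theorem joyGo_eval (N : Int) (M : Int) (nums : List Int) (h2 : 2 ≤ N)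
    (hle : N ≤ ((PySem.List.sorted nums (fun x => x) false).length : Int)) :
    joyGo N M nums
      = ((List.range ((PySem.List.sorted nums (fun x => x) false).take N.toNat).length).countP
          (joyGood ((PySem.List.sorted nums (fun x => x) false).take N.toNat) M) : Int) := by
  simp only [joyGo]
  exact joyGoA_count N M _ h2 hle

-- ===== VERDICT (by name: the statement is the Claim_ definition above) =====
theorem joyGo_spec : Claim_equal_joyGo := by
  intro N M nums _ hpre
  unfold Spec_joyGo
  by_cases h2 : N < 2
  · -- range(N-1) is empty on A's side; B returns 0 directly
    have hA : joyGo N M nums = 0 := by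
      unfold joyGo
      rw [PySem.List.pyRange_one_eq_nil (by omega)]
      rfl
    have hB : joyGo_alt N M nums = 0 := by
      unfold joyGo_alt
      simp [h2]
    rw [hA, hB]
  · have h2' : 2 ≤ N := by omega
    have hle : N ≤ ((PySem.List.sorted nums (fun x => x) false).length : Int) := by
      rcases hpre with h | h
      · rwa [PySem.List.length_sorted]
      · omega
    have hsorted : ((PySem.List.sorted nums (fun x => x) false).take N.toNat).Pairwise (· ≤ ·) := by
      apply List.Pairwise.take
      have := PySem.List.sorted_pairwise nums (fun x => x) (κ := Int)
      simpa using this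
    rw [joyGo_eval N M nums h2' hle, joyGo_alt_eval N M nums h2' hle,
      core_count _ M hsorted]
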